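-- pv_equiv track=rewrite | github.com/axu2/tiger-menus | app/scrape.py | floatMainEntrees
-- ===== SOURCE A (Python) =====
-- def floatMainEntrees(items):
--     """Return items with main entrees at the top."""
--     itemsMain = []
--     itemsEntree = []
--     itemsAfter = []
--
--     main = False
--     entree = True
--
--     for item in items:
--         if 'Main Entree' in item:
--             main = True
--             entree = False
--         elif "Entree" in item:
--             main = False
--             entree = True
--         elif "--" in item:
--             main = False
--             entree = False
--
--         if main:
--             itemsMain.append(item)
--         elif entree:
--             itemsEntree.append(item)
--         else:
--             itemsAfter.append(item)
--     return itemsMain + itemsEntree + itemsAfter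
-- ===== SOURCE B (Python) =====
-- def floatMainEntrees(items):
--     """Return items with main entrees at the top."""
--     main = False
--     entree = True
--     pairs = []
--     for item in items:
--         if 'Main Entree' in item:
--             main, entree = True, False
--         elif "Entree" in item:
--             main, entree = False, True
--         elif "--" in item:
--             main, entree = False, False
--         pairs.append((0 if main else (1 if entree else 2), item))
--     return [item for _, item in sorted(pairs, key=lambda p: p[0])]
-- ===== Notes on version B (the rewrite author's own statement) =====
-- stated objective: alternative
-- what changed: Instead of appending into three explicit lists and concatenating, B labels each item with a bucket number 0/1/2 during the single state-machine pass and returns the items reordered by a stable sort keyed on the bucket alone, relying on sort stability to preserve within-group order.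
import Mathlib
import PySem

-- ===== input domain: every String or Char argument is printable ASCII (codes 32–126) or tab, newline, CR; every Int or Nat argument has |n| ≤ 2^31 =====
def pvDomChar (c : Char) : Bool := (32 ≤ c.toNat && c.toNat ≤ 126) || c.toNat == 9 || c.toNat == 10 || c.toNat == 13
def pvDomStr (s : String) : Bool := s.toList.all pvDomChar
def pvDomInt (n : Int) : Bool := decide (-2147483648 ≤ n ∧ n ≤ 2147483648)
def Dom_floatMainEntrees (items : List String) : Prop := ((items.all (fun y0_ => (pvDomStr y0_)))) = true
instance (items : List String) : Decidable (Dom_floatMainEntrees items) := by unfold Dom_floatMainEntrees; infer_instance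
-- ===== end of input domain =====

-- B replaces A's three append-lists with bucket labels 0/1/2 assigned in one pass and a
-- stable sort keyed on the bucket alone (objective: alternative decomposition, same cost class).

-- ===== PORT A =====
-- one iteration of A's for-loop: update the sticky flags, then append to one of the three lists
def floatStepA (st : Bool × Bool × List String × List String × List String) (item : String) :
    Bool × Bool × List String × List String × List String :=
  let fl : Bool × Bool :=
    if PySem.Str.isIn "Main Entree" item then (true, false)
    else if PySem.Str.isIn "Entree" item then (false, true)
    else if PySem.Str.isIn "--" item then (false, false)
    else (st.1, st.2.1)
  if fl.1 then (fl.1, fl.2, st.2.2.1 ++ [item], st.2.2.2.1, st.2.2.2.2)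
  else if fl.2 then (fl.1, fl.2, st.2.2.1, st.2.2.2.1 ++ [item], st.2.2.2.2)
  else (fl.1, fl.2, st.2.2.1, st.2.2.2.1, st.2.2.2.2 ++ [item])

def floatMainEntrees (items : List String) : List String :=
  let r := items.foldl floatStepA (false, true, [], [], [])
  r.2.2.1 ++ r.2.2.2.1 ++ r.2.2.2.2

-- ===== PORT B =====
-- one iteration of B's for-loop: update the sticky flags, then append the (bucket, item) pair
def floatStepB (st : Bool × Bool × List (Int × String)) (item : String) :
    Bool × Bool × List (Int × String) :=
  let fl : Bool × Bool :=
    if PySem.Str.isIn "Main Entree" item then (true, false)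
    else if PySem.Str.isIn "Entree" item then (false, true)
    else if PySem.Str.isIn "--" item then (false, false)
    else (st.1, st.2.1)
  (fl.1, fl.2, st.2.2 ++ [((if fl.1 then (0 : Int) else if fl.2 then 1 else 2), item)])

def floatMainEntrees_alt (items : List String) : List String :=
  let r := items.foldl floatStepB (false, true, [])
  (PySem.List.sorted r.2.2 (fun p => p.1)).map (fun p => p.2)

-- ===== PRECONDITION & SPEC =====
def Spec_floatMainEntrees (items : List String) (out : List String) : Prop := out = floatMainEntrees_alt items
instance (items : List String) (out : List String) : Decidable (Spec_floatMainEntrees items out) := by unfold Spec_floatMainEntrees; infer_instance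

-- ===== CLAIM (what is proved, stated in full; the proofs are below) =====
def Claim_equal_floatMainEntrees : Prop := ∀ (items : List String), Dom_floatMainEntrees items → Spec_floatMainEntrees items (floatMainEntrees items)

-- ===== LEMMAS AND PROOFS =====

-- the shared flag update of both loops
def pvStepFlags (main entree : Bool) (item : String) : Bool × Bool :=
  if PySem.Str.isIn "Main Entree" item then (true, false)
  else if PySem.Str.isIn "Entree" item then (false, true)
  else if PySem.Str.isIn "--" item then (false, false)
  else (main, entree)

-- the flags after processing a whole list
def pvFlagsAfter (main entree : Bool) : List String → Bool × Bool
  | [] => (main, entree)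
  | it :: rest => pvFlagsAfter (pvStepFlags main entree it).1 (pvStepFlags main entree it).2 rest

-- the (bucket, item) pairs produced from given start flags
def pvPairScan (main entree : Bool) : List String → List (Int × String)
  | [] => []
  | it :: rest =>
    let fl := pvStepFlags main entree it
    ((if fl.1 then (0 : Int) else if fl.2 then 1 else 2), it) :: pvPairScan fl.1 fl.2 rest

theorem pvPairScan_buckets (items : List String) : ∀ (main entree : Bool),
    ∀ p ∈ pvPairScan main entree items, p.1 = 0 ∨ p.1 = 1 ∨ p.1 = 2 := by
  induction items with
  | nil => intro _ _ p hp; simp [pvPairScan] at hp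
  | cons it rest ih =>
    intro main entree p hp
    simp only [pvPairScan, List.mem_cons] at hp
    rcases hp with h | h
    · subst h; by_cases h1 : (pvStepFlags main entree it).1 <;>
        by_cases h2 : (pvStepFlags main entree it).2 <;> simp [h1, h2]
    · exact ih _ _ p h

def pvBucketSnd (b : Int) (ps : List (Int × String)) : List String :=
  (ps.filter (fun p => p.1 == b)).map (fun p => p.2)

theorem pvStepA_eq (st : Bool × Bool × List String × List String × List String)
    (item : String) :
    floatStepA st item =
      (if (pvStepFlags st.1 st.2.1 item).1 then
        ((pvStepFlags st.1 st.2.1 item).1, (pvStepFlags st.1 st.2.1 item).2,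
         st.2.2.1 ++ [item], st.2.2.2.1, st.2.2.2.2)
      else if (pvStepFlags st.1 st.2.1 item).2 then
        ((pvStepFlags st.1 st.2.1 item).1, (pvStepFlags st.1 st.2.1 item).2,
         st.2.2.1, st.2.2.2.1 ++ [item], st.2.2.2.2)
      else
        ((pvStepFlags st.1 st.2.1 item).1, (pvStepFlags st.1 st.2.1 item).2,
         st.2.2.1, st.2.2.2.1, st.2.2.2.2 ++ [item])) := rfl

theorem pvStepB_eq (st : Bool × Bool × List (Int × String)) (item : String) :
    floatStepB st item =
      ((pvStepFlags st.1 st.2.1 item).1, (pvStepFlags st.1 st.2.1 item).2,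
       st.2.2 ++ [((if (pvStepFlags st.1 st.2.1 item).1 then (0 : Int)
                    else if (pvStepFlags st.1 st.2.1 item).2 then 1 else 2), item)]) := rfl

theorem pvB_loop (items : List String) : ∀ (main entree : Bool) (acc : List (Int × String)),
    items.foldl floatStepB (main, entree, acc)
    = ((pvFlagsAfter main entree items).1, (pvFlagsAfter main entree items).2,
       acc ++ pvPairScan main entree items) := by
  induction items with
  | nil => intro main entree acc; simp [pvFlagsAfter, pvPairScan]
  | cons it rest ih =>
    intro main entree acc
    rcases hp : pvStepFlags main entree it with ⟨mf, ef⟩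
    simp only [List.foldl_cons, pvStepB_eq, hp]
    rw [ih]
    simp only [pvFlagsAfter, pvPairScan, hp]
    simp [List.append_assoc]

theorem pvA_loop (items : List String) : ∀ (main entree : Bool)
    (m e a : List String),
    items.foldl floatStepA (main, entree, m, e, a)
    = ((pvFlagsAfter main entree items).1, (pvFlagsAfter main entree items).2,
       m ++ pvBucketSnd 0 (pvPairScan main entree items),
       e ++ pvBucketSnd 1 (pvPairScan main entree items),
       a ++ pvBucketSnd 2 (pvPairScan main entree items)) := by
  induction items with
  | nil => intro main entree m e a; simp [pvFlagsAfter, pvPairScan, pvBucketSnd]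
  | cons it rest ih =>
    intro main entree m e a
    rcases hp : pvStepFlags main entree it with ⟨mf, ef⟩
    simp only [List.foldl_cons, pvStepA_eq, hp]
    cases mf <;> cases ef <;>
      (simp only [Bool.false_eq_true, if_true, if_false]
       rw [ih]
       simp only [pvFlagsAfter, pvPairScan, hp]
       simp [pvBucketSnd, List.append_assoc])

-- insertBy skips a prefix it does not go before
theorem pvInsertBy_append {α : Type} (before : α → α → Bool) (x : α) (l r : List α)
    (h : ∀ y ∈ l, before x y = false) :
    PySem.List.insertBy before x (l ++ r) = l ++ PySem.List.insertBy before x r := by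
  induction l with
  | nil => simp
  | cons y ys ih =>
    have hy : before x y = false := h y (by simp)
    simp only [List.cons_append, PySem.List.insertBy, hy]
    simp [ih (fun z hz => h z (by simp [hz]))]

theorem pvInsertBy_all_not {α : Type} (before : α → α → Bool) (x : α) (l : List α)
    (h : ∀ y ∈ l, before x y = false) :
    PySem.List.insertBy before x l = l ++ [x] := by
  induction l with
  | nil => simp [PySem.List.insertBy]
  | cons y ys ih =>
    have hy : before x y = false := h y (by simp)
    simp only [PySem.List.insertBy, hy]
    simp [ih (fun z hz => h z (by simp [hz]))]

theorem pvInsertBy_cons {α : Type} (before : α → α → Bool) (x : α) (l : List α)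
    (h : ∀ y ∈ l.head?, before x y = true) :
    PySem.List.insertBy before x l = x :: l := by
  cases l with
  | nil => simp [PySem.List.insertBy]
  | cons y ys => simp [PySem.List.insertBy, h y (by simp)]

-- a stable sort on bucket keys 0/1/2 is the concatenation of the three bucket filters
theorem pvSorted_buckets (ps : List (Int × String))
    (h : ∀ p ∈ ps, p.1 = 0 ∨ p.1 = 1 ∨ p.1 = 2) :
    PySem.List.sorted ps (fun p => p.1)
      = ps.filter (fun p => p.1 == 0) ++ ps.filter (fun p => p.1 == 1)
        ++ ps.filter (fun p => p.1 == 2) := by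
  induction ps using List.reverseRecOn with
  | nil => simp [PySem.List.sorted_eq_foldl_insertBy]
  | append_singleton ps p ih =>
    have hps : ∀ q ∈ ps, q.1 = 0 ∨ q.1 = 1 ∨ q.1 = 2 := fun q hq => h q (by simp [hq])
    rw [PySem.List.sorted_eq_foldl_insertBy, List.foldl_append]
    rw [← PySem.List.sorted_eq_foldl_insertBy, ih hps]
    simp only [List.foldl_cons, List.foldl_nil]
    have key0 : ∀ y ∈ ps.filter (fun p => p.1 == (0 : Int)), y.1 = 0 := by
      intro y hy; have := (List.mem_filter.mp hy).2; simpa using this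
    have key1 : ∀ y ∈ ps.filter (fun p => p.1 == (1 : Int)), y.1 = 1 := by
      intro y hy; have := (List.mem_filter.mp hy).2; simpa using this
    have key2 : ∀ y ∈ ps.filter (fun p => p.1 == (2 : Int)), y.1 = 2 := by
      intro y hy; have := (List.mem_filter.mp hy).2; simpa using this
    rcases h p (by simp) with h0 | h1 | h2
    · rw [List.append_assoc,
        pvInsertBy_append _ _ _ _ (fun y hy => by simp [h0, key0 y hy]),
        pvInsertBy_cons _ _ _ (fun y hy => by
          rcases List.mem_append.mp (List.mem_of_mem_head? hy) with hy' | hy'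
          · simp [h0, key1 y hy']
          · simp [h0, key2 y hy'])]
      simp [List.filter_append, h0, List.append_assoc]
    · rw [pvInsertBy_append _ _ _ _ (fun y hy => by
          rcases List.mem_append.mp hy with hy' | hy'
          · simp [h1, key0 y hy']
          · simp [h1, key1 y hy']),
        pvInsertBy_cons _ _ _ (fun y hy => by
          simp [h1, key2 y (List.mem_of_mem_head? hy)])]
      simp [List.filter_append, h1, List.append_assoc]
    · rw [pvInsertBy_all_not _ _ _ (fun y hy => by
          rcases List.mem_append.mp hy with hy' | hy'
          · rcases List.mem_append.mp hy' with hy'' | hy''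
            · simp [h2, key0 y hy'']
            · simp [h2, key1 y hy'']
          · simp [h2, key2 y hy'])]
      simp [List.filter_append, h2, List.append_assoc]

-- ===== VERDICT (by name: the statement is the Claim_ definition above) =====
theorem floatMainEntrees_spec : Claim_equal_floatMainEntrees := by
  intro items _
  unfold Spec_floatMainEntrees floatMainEntrees floatMainEntrees_alt
  simp only [pvA_loop, pvB_loop]
  simp only [List.nil_append]
  rw [pvSorted_buckets _ (pvPairScan_buckets items false true)]
  simp [pvBucketSnd, List.map_append]
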